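-- pv_equiv track=rewrite | github.com/Akashdeepsingh1/project | 2020/SubstringOfSizeKwithKdistinctCharacter.py | solution
-- ===== SOURCE A (Python) =====
-- def solution(s,k):
--     len_s =len(s)
--     if len_s<k:
--         return []
--     else:
--         final_list = []
--         for i in range(len_s-k+1):
--             temp_s = s[i:i+k]
--             temp_dic = {}
--             flag = True
--             for j in range(k):
--                 if temp_s[j] in temp_dic:
--                     flag = False
--                 else:
--                     temp_dic[temp_s[j]] = 1
--             if flag and temp_s not in final_list:
--                 final_list.append(temp_s[:])
--
--         return final_list
-- ===== SOURCE B (Python) =====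
-- def solution(s, k):
--     n = len(s)
--     if n < k:
--         return []
--     if k <= 0:
--         return ['']
--     # O(n) sliding window: `left` is the smallest start L such that s[L:j+1] has no
--     # repeated character; a window s[i:i+k] is all-distinct iff left <= i when its
--     # last index j = i+k-1 is processed. Ordered dedup via dict key insertion.
--     prev = {}        # char -> last index seen
--     left = 0
--     seen = {}
--     for j in range(n):
--         c = s[j]
--         p = prev.get(c, -1)
--         if p >= left:
--             left = p + 1
--         prev[c] = j
--         i = j - k + 1
--         if i >= left:
--             seen[s[i:j + 1]] = None
--     return list(seen)
-- ===== Notes on version B (the rewrite author's own statement) =====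
-- stated objective: faster
-- what changed: A tests each of the n-k+1 windows from scratch with a hand-built dict and scans the growing output list for membership; B makes one left-to-right sliding-window pass keeping the last occurrence of each character and a left pointer (the smallest all-distinct start), emitting window s[i:i+k] exactly when left <= i, with dict-key insertion as the ordered dedup.
-- outside the precondition, e.g. on solution('aab', -1): A returns ['aa', ''], B returns ['']
import Mathlib
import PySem

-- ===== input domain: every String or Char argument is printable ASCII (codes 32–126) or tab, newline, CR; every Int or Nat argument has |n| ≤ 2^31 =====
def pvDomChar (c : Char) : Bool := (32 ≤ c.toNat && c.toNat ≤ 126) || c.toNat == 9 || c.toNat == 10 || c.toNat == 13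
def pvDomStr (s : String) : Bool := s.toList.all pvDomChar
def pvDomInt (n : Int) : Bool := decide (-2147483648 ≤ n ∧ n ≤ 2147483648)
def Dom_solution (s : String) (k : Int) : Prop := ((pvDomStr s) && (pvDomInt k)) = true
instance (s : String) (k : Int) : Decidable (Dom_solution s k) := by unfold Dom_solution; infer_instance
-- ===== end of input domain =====

-- B replaces A's per-window distinctness dict and 'not in final_list' scan by a single
-- left-to-right sliding-window pass (last-occurrence dict + left pointer) with dict-key
-- insertion as the ordered dedup (objective: faster — measured).

-- ===== PORT A =====
def solution (s : String) (k : Int) : List String :=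
  let len_s : Int := PySem.Str.len s
  if len_s < k then
    []
  else
    (PySem.List.pyRange 0 (len_s - k + 1)).foldl (fun final_list i =>
      let temp_s : String := PySem.Str.slice s (some i) (some (i + k))
      -- inner loop 'for j in range(k)': temp_s[j] is always in range when 0 ≤ k
      -- (every window has length k), so pyGetD's default is never read inside Pre_
      let r :=
        (PySem.List.pyRange 0 k).foldl
          (fun (st : PySem.Dict Char Int × Bool) j =>
            let c := PySem.List.pyGetD temp_s.toList j ' '
            if st.1.contains c then (st.1, false) else (st.1.insert c 1, st.2))
          (PySem.Dict.empty, true)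
      if r.2 && !(final_list.contains temp_s) then final_list ++ [temp_s] else final_list) []

-- ===== PORT B =====
-- the body of B's 'for j in range(n)' loop; state = (prev, left, seen)
def solution_altStep (s : String) (k : Int)
    (st : PySem.Dict Char Int × Int × PySem.Dict String Unit) (j : Int) :
    PySem.Dict Char Int × Int × PySem.Dict String Unit :=
  let c := PySem.List.pyGetD s.toList j ' '
  let p := st.1.getD c (-1)
  let left := if p ≥ st.2.1 then p + 1 else st.2.1
  let i := j - k + 1
  let seen :=
    if i ≥ left then st.2.2.insert (PySem.Str.slice s (some i) (some (j + 1))) () else st.2.2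
  (st.1.insert c j, left, seen)

def solution_alt (s : String) (k : Int) : List String :=
  if PySem.Str.len s < k then []
  else if k ≤ 0 then [""]
  else
    ((PySem.List.pyRange 0 (PySem.Str.len s)).foldl (solution_altStep s k)
      (PySem.Dict.empty, 0, PySem.Dict.empty)).2.2.keys

-- ===== PRECONDITION & SPEC =====
-- Pre_ excludes k < 0, a corner where "substring of size k" is meaningless and the
-- clamped slices make A emit variable-length windows with the distinctness loop
-- skipped, while B returns ['']; neither value is the specified one.
def Pre_solution (s : String) (k : Int) : Prop := 0 ≤ k
instance (s : String) (k : Int) : Decidable (Pre_solution s k) := by unfold Pre_solution; infer_instance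

def pvWitness_solution : String × Int := ("abcab", 3)

def Spec_solution (s : String) (k : Int) (out : List String) : Prop := out = solution_alt s k
instance (s : String) (k : Int) (out : List String) : Decidable (Spec_solution s k out) := by unfold Spec_solution; infer_instance

-- ===== CLAIM (what is proved, stated in full; the proofs are below) =====
def Claim_equal_solution : Prop := ∀ (s : String) (k : Int), Dom_solution s k → Pre_solution s k → Spec_solution s k (solution s k)

-- ===== LEMMAS AND PROOFS =====

-- the window of length k starting at (natural) index i, and the list of all
-- pairwise-distinct windows in start order — the common form both ports reduce to
def pvWin (s : String) (k : Int) (i : Nat) : String :=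
  PySem.Str.slice s (some (i : Int)) (some ((i : Int) + k))

def pvGood (s : String) (k : Int) (n : Nat) : List String :=
  ((List.range n).map (pvWin s k)).filter (fun w => decide w.toList.Nodup)

-- ===== A-side: A's result is the ordered dedup of the distinct windows =====

-- A's inner dict loop, on the character list: the flag ends true iff the remaining
-- characters are pairwise distinct and none of them is already a key
theorem pv_inner_fold (cs : List Char) (d : PySem.Dict Char Int) (f : Bool) (S : List Char)
    (hd : ∀ c, d.contains c = decide (c ∈ S)) :
    (cs.foldl (fun st c => if st.1.contains c then (st.1, false) else (st.1.insert c 1, st.2)) (d, f)).2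
      = (f && decide (cs.Nodup ∧ ∀ c ∈ cs, c ∉ S)) := by
  induction cs generalizing d f S with
  | nil => simp
  | cons c cs ih =>
    simp only [List.foldl_cons, hd c]
    by_cases hc : c ∈ S
    · rw [if_pos (by simp [hc])]
      rw [ih d false S hd]
      simp [hc]
    · rw [if_neg (by simp [hc])]
      rw [ih (d.insert c 1) f (c :: S)
        (by intro c'; rw [PySem.Dict.contains_insert, hd c']; by_cases h : c' = c <;> simp [h])]
      congr 1
      rw [decide_eq_decide]
      simp only [List.nodup_cons, List.mem_cons]
      constructor
      · rintro ⟨hn, hall⟩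
        refine ⟨⟨fun hmem => (hall c hmem) (Or.inl rfl), hn⟩, ?_⟩
        rintro x (rfl | hx)
        · exact hc
        · exact fun hxS => hall x hx (Or.inr hxS)
      · rintro ⟨⟨hcn, hn⟩, hall⟩
        refine ⟨hn, fun x hx hor => ?_⟩
        rcases hor with rfl | hxS
        · exact hcn hx
        · exact hall x (Or.inr hx) hxS

-- A's flag for a full window of length k equals the distinctness test
theorem pv_flag_eq (cs : List Char) (k : Int) (hk : 0 ≤ k) (hlen : cs.length = k.toNat) :
    ((PySem.List.pyRange 0 k).foldl
      (fun (st : PySem.Dict Char Int × Bool) j =>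
        if st.1.contains (PySem.List.pyGetD cs j ' ') then (st.1, false)
        else (st.1.insert (PySem.List.pyGetD cs j ' ') 1, st.2))
      (PySem.Dict.empty, true)).2 = decide cs.Nodup := by
  have hk' : k = PySem.List.len cs := by
    simp only [PySem.List.len]
    omega
  have hb := PySem.List.foldl_pyRange_pyGetD cs ' '
    (fun (st : PySem.Dict Char Int × Bool) c =>
      if st.1.contains c then (st.1, false) else (st.1.insert c 1, st.2))
    (PySem.Dict.empty, true) (a := 0) (le_refl 0)
  rw [hk', hb]
  simp only [Int.toNat_zero, List.drop_zero]
  rw [pv_inner_fold cs PySem.Dict.empty true []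
    (by intro c; simp [PySem.Dict.contains_empty])]
  simp

-- a full window inside the valid range has exactly k characters
theorem pv_window_len (s : String) (i k : Int) (hi : 0 ≤ i) (hk : 0 ≤ k)
    (hin : i + k ≤ s.toList.length) :
    (PySem.Str.slice s (some i) (some (i + k))).toList.length = k.toNat := by
  rw [PySem.Str.toList_slice, PySem.Chars.slice_eq_listSlice]
  have h2 : i + k = (((i + k).toNat : Nat) : Int) := by omega
  have h1 : i = ((i.toNat : Nat) : Int) := by omega
  rw [h2, h1, PySem.List.slice_natCast]
  simp only [List.length_take, List.length_drop]
  omega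

theorem pv_A_eq (s : String) (k : Int) (hk : 0 ≤ k) (h : ¬ PySem.Str.len s < k) :
    solution s k = PySem.Set.ofList (pvGood s k (s.toList.length - k.toNat + 1)) := by
  unfold solution
  simp only [if_neg h]
  have hcong : ∀ (acc : List String), ∀ i ∈ PySem.List.pyRange 0 (PySem.Str.len s - k + 1),
      (if ((PySem.List.pyRange 0 k).foldl
            (fun (st : PySem.Dict Char Int × Bool) j =>
              if st.1.contains (PySem.List.pyGetD (PySem.Str.slice s (some i) (some (i + k))).toList j ' ')
              then (st.1, false)
              else (st.1.insert (PySem.List.pyGetD (PySem.Str.slice s (some i) (some (i + k))).toList j ' ') 1, st.2))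
            (PySem.Dict.empty, true)).2
          && !(acc.contains (PySem.Str.slice s (some i) (some (i + k)))) then
        acc ++ [PySem.Str.slice s (some i) (some (i + k))]
      else acc)
      = (if (PySem.Str.slice s (some i) (some (i + k))).toList.Nodup
         then PySem.Set.add acc (PySem.Str.slice s (some i) (some (i + k)))
         else acc) := by
    intro acc i hi
    rw [PySem.List.mem_pyRange_one] at hi
    have hilen : i + k ≤ (s.toList.length : Int) := by
      rw [PySem.Str.len_eq] at h hi
      omega
    have hwlen := pv_window_len s i k hi.1 hk hilen
    rw [pv_flag_eq _ k hk hwlen, PySem.Set.add_eq_ite]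
    by_cases hnd : (PySem.List.slice s.toList (some i) (some (i + k))).Nodup
    · by_cases hmem : PySem.Str.slice s (some i) (some (i + k)) ∈ acc
      · simp [hnd, hmem, List.contains_eq_mem]
      · simp [hnd, hmem, List.contains_eq_mem]
    · simp [hnd, List.contains_eq_mem]
  refine (PySem.List.foldl_congr_mem _ _ _ [] hcong).trans ?_
  rw [← List.foldl_map (f := fun i : Int => PySem.Str.slice s (some i) (some (i + k)))
    (g := fun (acc : List String) w => if w.toList.Nodup then PySem.Set.add acc w else acc)]
  rw [PySem.List.foldl_ite_eq_foldl_filter (fun w : String => w.toList.Nodup) PySem.Set.add _ []]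
  rw [← PySem.Set.ofList_eq_foldl]
  unfold pvGood
  have hrange : PySem.Str.len s - k + 1 = ((s.toList.length - k.toNat + 1 : Nat) : Int) := by
    rw [PySem.Str.len_eq] at h ⊢
    omega
  rw [hrange, PySem.List.pyRange_zero_natCast, List.map_map]
  rfl

-- ===== B-side: the sliding window emits exactly the distinct windows =====

-- last index t < j with cs[t] = c, as the Python loop keeps it (-1 = none yet)
def pvLast (cs : List Char) : Nat → Char → Int
  | 0, _ => -1
  | j+1, c => if cs.getD j ' ' = c then (j : Int) else pvLast cs j c

-- the left pointer after processing cs[0..j)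
def pvLeft (cs : List Char) : Nat → Int
  | 0 => 0
  | j+1 =>
    if pvLast cs j (cs.getD j ' ') ≥ pvLeft cs j then pvLast cs j (cs.getD j ' ') + 1
    else pvLeft cs j

-- windows emitted by B's loop during the first m steps, in order
def pvEmit (s : String) (k : Int) (m : Nat) : List String :=
  (List.range m).filterMap (fun j =>
    if pvLeft s.toList (j+1) ≤ (j : Int) - k + 1 then
      some (PySem.Str.slice s (some ((j : Int) - k + 1)) (some ((j : Int) + 1)))
    else none)

theorem pvLast_lt (cs : List Char) (j : Nat) (c : Char) : pvLast cs j c < j := by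
  induction j with
  | zero => simp [pvLast]
  | succ j ih =>
    simp only [pvLast]
    split_ifs <;> [omega; exact lt_trans ih (by exact_mod_cast Nat.lt_succ_self j)]

theorem pvLeft_bounds (cs : List Char) (j : Nat) : 0 ≤ pvLeft cs j ∧ pvLeft cs j ≤ j := by
  induction j with
  | zero => simp [pvLeft]
  | succ j ih =>
    have := pvLast_lt cs j (cs.getD j ' ')
    simp only [pvLeft]
    split_ifs <;> constructor <;> push_cast <;> omega

-- membership in the window [L, j) is exactly 'last occurrence ≥ L'
theorem pv_mem_iff_last (cs : List Char) (j : Nat) (hj : j ≤ cs.length) (L : Nat) (c : Char) :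
    c ∈ (cs.take j).drop L ↔ (L : Int) ≤ pvLast cs j c := by
  induction j with
  | zero => simp [pvLast]; omega
  | succ j ih =>
    have hj' : j < cs.length := hj
    have htake : cs.take (j+1) = cs.take j ++ [cs.getD j ' '] := by
      rw [List.take_succ, List.getElem?_eq_getElem hj', List.getD_eq_getElem cs ' ' hj']
      rfl
    rw [htake]
    by_cases hL : L ≤ j
    · rw [List.drop_append_of_le_length (by rw [List.length_take]; omega)]
      simp only [List.mem_append, List.mem_singleton, pvLast]
      split_ifs with hc
      · exact ⟨fun _ => by exact_mod_cast hL, fun _ => Or.inr hc.symm⟩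
      · have hne : ¬ (c = cs.getD j ' ') := fun e => hc e.symm
        rw [ih (le_of_lt hj')]
        constructor
        · rintro (h | h)
          · exact h
          · exact absurd h hne
        · exact fun h => Or.inl h
    · rw [List.drop_eq_nil_of_le (by rw [List.length_append, List.length_take]; simp; omega)]
      have := pvLast_lt cs (j+1) c
      simp only [List.not_mem_nil, false_iff]
      push_cast at this ⊢
      omega

-- the left pointer is exactly the least all-distinct start
theorem pv_left_le_iff (cs : List Char) (j : Nat) (hj : j ≤ cs.length) (L : Nat) (hL : L ≤ j) :
    (pvLeft cs j ≤ (L : Int)) ↔ ((cs.take j).drop L).Nodup := by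
  induction j with
  | zero => simp [pvLeft]
  | succ j ih =>
    have hj' : j < cs.length := hj
    have htake : cs.take (j+1) = cs.take j ++ [cs.getD j ' '] := by
      rw [List.take_succ, List.getElem?_eq_getElem hj', List.getD_eq_getElem cs ' ' hj']
      rfl
    rcases Nat.lt_or_ge L (j+1) with hL | hL
    · have hLj : L ≤ j := by omega
      rw [htake, List.drop_append_of_le_length (by rw [List.length_take]; omega)]
      rw [List.nodup_append]
      have hmem := pv_mem_iff_last cs j (le_of_lt hj') L (cs.getD j ' ')
      have hih := ih (le_of_lt hj') hLj
      simp only [pvLeft, List.nodup_singleton, List.mem_singleton, true_and]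
      constructor
      · intro hle
        have hle' : pvLeft cs j ≤ (L : Int) ∧ pvLast cs j (cs.getD j ' ') < (L : Int) := by
          split_ifs at hle <;> omega
        refine ⟨hih.mp hle'.1, fun a ha b hb => ?_⟩
        subst hb
        intro he
        subst he
        exact absurd (hmem.mp ha) (by omega)
      · rintro ⟨hnd, hdisj⟩
        have h1 : pvLeft cs j ≤ (L : Int) := hih.mpr hnd
        have h2 : pvLast cs j (cs.getD j ' ') < (L : Int) := by
          by_contra hge
          push_neg at hge
          exact hdisj _ (hmem.mpr hge) _ rfl rfl
        split_ifs <;> omega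
    · have hL1 : L = j + 1 := by omega
      subst hL1
      rw [List.drop_eq_nil_of_le (by rw [List.length_take]; omega)]
      have := pvLeft_bounds cs (j+1)
      simp only [List.nodup_nil, iff_true]
      push_cast at this ⊢
      omega

-- loop invariant of B's fold: after m steps the state is (last-occurrence dict,
-- left pointer, the emitted windows inserted in order)
theorem pv_B_inv (s : String) (k : Int) (m : Nat) (hm : m ≤ s.toList.length) :
    ∃ d : PySem.Dict Char Int,
      ((List.map (fun j : Nat => (j : Int)) (List.range m)).foldl (solution_altStep s k)
          (PySem.Dict.empty, 0, PySem.Dict.empty))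
        = (d, pvLeft s.toList m,
            (pvEmit s k m).foldl (fun t w => t.insert w ()) PySem.Dict.empty)
      ∧ ∀ c, d.getD c (-1) = pvLast s.toList m c := by
  induction m with
  | zero =>
    exact ⟨PySem.Dict.empty, rfl, fun c => by simp [PySem.Dict.getD_empty, pvLast]⟩
  | succ m ih =>
    obtain ⟨d, heq, hd⟩ := ih (by omega)
    refine ⟨d.insert (s.toList.getD m ' ') (m : Int), ?_, ?_⟩
    · rw [List.range_succ, List.map_append, List.foldl_append, heq]
      simp only [List.map_cons, List.map_nil, List.foldl_cons, List.foldl_nil]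
      simp only [solution_altStep, PySem.List.pyGetD_natCast, hd]
      have hemit : (pvEmit s k (m+1)).foldl (fun t w => t.insert w ()) PySem.Dict.empty
          = if pvLeft s.toList (m+1) ≤ (m : Int) - k + 1
            then ((pvEmit s k m).foldl (fun t w => t.insert w ()) PySem.Dict.empty).insert
                   (PySem.Str.slice s (some ((m : Int) - k + 1)) (some ((m : Int) + 1))) ()
            else (pvEmit s k m).foldl (fun t w => t.insert w ()) PySem.Dict.empty := by
        unfold pvEmit
        rw [List.range_succ, List.filterMap_append, List.foldl_append]
        simp only [List.filterMap_cons, List.filterMap_nil]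
        split_ifs <;> simp
      rw [hemit]
      simp only [pvLeft, ge_iff_le]
    · intro c'
      rw [PySem.Dict.getD_insert]
      by_cases hcc : c' = s.toList.getD m ' '
      · simp [hcc, pvLast]
      · rw [if_neg hcc]
        simp only [pvLast]
        rw [if_neg (fun e => hcc e.symm)]
        exact hd c'

-- a filter of a map as one filterMap
theorem pv_filter_map (l : List Nat) (f : Nat → String) (p : String → Bool) :
    (l.map f).filter p = l.filterMap (fun x => if p (f x) then some (f x) else none) := by
  induction l with
  | nil => rfl
  | cons x xs ih =>
    simp only [List.map_cons, List.filter_cons, List.filterMap_cons]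
    split_ifs <;> simp [ih]

-- reindexing j = i + (k-1): the emitted windows are the distinct windows in start order
theorem pv_emit_eq_good (s : String) (k : Int) (hk : 0 < k) (hn : k.toNat ≤ s.toList.length) :
    pvEmit s k s.toList.length = pvGood s k (s.toList.length - k.toNat + 1) := by
  have hK : (k.toNat : Int) = k := Int.toNat_of_nonneg (le_of_lt hk)
  have hK1 : 1 ≤ k.toNat := by omega
  unfold pvEmit pvGood
  rw [show List.range s.toList.length
      = List.range (k.toNat - 1) ++ (List.range (s.toList.length - k.toNat + 1)).map ((k.toNat - 1) + ·) from by
    rw [← List.range_add]; congr 1; omega]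
  rw [List.filterMap_append, List.filterMap_map]
  rw [List.filterMap_eq_nil_iff.mpr (fun j hj => by
    rw [List.mem_range] at hj
    rw [if_neg]
    have := (pvLeft_bounds s.toList (j+1)).1
    omega)]
  rw [List.nil_append, pv_filter_map]
  refine List.filterMap_congr (fun i hi => ?_)
  rw [List.mem_range] at hi
  have e1 : ((((k.toNat - 1) + i : Nat)) : Int) - k + 1 = (i : Int) := by
    push_cast [Nat.cast_sub hK1]
    omega
  have e2 : ((((k.toNat - 1) + i : Nat)) : Int) + 1 = (i : Int) + k := by
    push_cast [Nat.cast_sub hK1]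
    omega
  have e3 : (k.toNat - 1) + i + 1 = i + k.toNat := by omega
  simp only [Function.comp_apply, e1, e2, e3]
  have hnd : (pvLeft s.toList (i + k.toNat) ≤ (i : Int))
      ↔ (pvWin s k i).toList.Nodup := by
    rw [pv_left_le_iff s.toList (i + k.toNat) (by omega) i (by omega)]
    unfold pvWin
    rw [PySem.Str.toList_slice, PySem.Chars.slice_eq_listSlice]
    rw [show (i : Int) + k = ((i + k.toNat : Nat) : Int) from by omega]
    rw [PySem.List.slice_natCast, ← List.drop_take]
  have hw : PySem.Str.slice s (some (i : Int)) (some ((i : Int) + k)) = pvWin s k i := rfl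
  rw [hw]
  by_cases hc : (pvWin s k i).toList.Nodup
  · rw [if_pos (hnd.mpr hc), if_pos (by simp [hc])]
  · rw [if_neg (fun hle => hc (hnd.mp hle)), if_neg (by simp [hc])]

theorem pv_B_eq (s : String) (k : Int) (hk : 0 < k) (h : ¬ PySem.Str.len s < k) :
    solution_alt s k = PySem.Set.ofList (pvGood s k (s.toList.length - k.toNat + 1)) := by
  unfold solution_alt
  rw [if_neg h, if_neg (by omega)]
  rw [PySem.Str.len_eq, PySem.List.pyRange_zero_natCast]
  obtain ⟨d, heq, -⟩ := pv_B_inv s k s.toList.length le_rfl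
  rw [heq]
  show ((pvEmit s k s.toList.length).foldl (fun t w => t.insert w ()) PySem.Dict.empty).keys = _
  rw [PySem.Dict.keys_foldl_insert (f := fun _ _ => ()), PySem.Dict.keys_empty,
    PySem.Set.update_nil_left]
  rw [pv_emit_eq_good s k hk (by rw [PySem.Str.len_eq] at h; omega)]

-- k = 0: both sides are ['']
theorem pv_ofList_const (l : List String) (a : String) (hne : l ≠ []) (hall : ∀ x ∈ l, x = a) :
    PySem.Set.ofList l = [a] := by
  induction l with
  | nil => exact absurd rfl hne
  | cons x xs ih =>
    obtain rfl : x = a := hall x (List.mem_cons_self)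
    rcases Nat.eq_zero_or_pos xs.length with h0 | hpos
    · rw [List.length_eq_zero_iff] at h0; subst h0; rfl
    · have hxs : xs ≠ [] := by intro h; simp [h] at hpos
      rw [PySem.Set.ofList_cons, ih hxs (fun y hy => hall y (List.mem_cons_of_mem _ hy))]
      simp [PySem.Set.discard]

-- ===== VERDICT (by name: the statement is the Claim_ definition above) =====
theorem solution_spec : Claim_equal_solution := by
  intro s k _ hpre
  unfold Spec_solution
  by_cases h : PySem.Str.len s < k
  · unfold solution solution_alt
    simp only [if_pos h]
  · rcases lt_or_eq_of_le hpre with hk | hk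
    · rw [pv_A_eq s k (le_of_lt hk) h, pv_B_eq s k hk h]
    · subst hk
      rw [pv_A_eq s 0 le_rfl h]
      have halt : solution_alt s 0 = [""] := by
        unfold solution_alt
        simp only [if_neg h, if_pos (le_refl (0:Int))]
      rw [halt]
      have hwin : ∀ i : Nat, pvWin s 0 i = "" := by
        intro i
        apply String.ext
        unfold pvWin
        rw [PySem.Str.toList_slice, PySem.Chars.slice_eq_listSlice]
        rw [show (i : Int) + 0 = (i : Int) from by omega, PySem.List.slice_natCast]
        simp
      have hgood : pvGood s 0 (s.toList.length - (0:Int).toNat + 1)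
          = (List.range (s.toList.length + 1)).map (fun _ => "") := by
        unfold pvGood
        rw [List.map_congr_left (fun i _ => hwin i)]
        rw [List.filter_eq_self.mpr (by intro a ha; rw [List.mem_map] at ha; obtain ⟨_, -, rfl⟩ := ha; rfl)]
        rfl
      rw [hgood]
      apply pv_ofList_const
      · simp
      · intro x hx
        rw [List.mem_map] at hx
        obtain ⟨_, -, rfl⟩ := hx
        rfl
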